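-- pv_equiv track=rewrite | github.com/Ighina/NSE-TopicSegmentation | models/metrics.py | get_seg_boundaries
-- ===== SOURCE A (Python) =====
-- def get_seg_boundaries(classifications, sentences_length = None):
--     """
--     :param list of tuples, each tuple is a sentence and its class (1 if it the sentence starts a segment, 0 otherwise).
--     e.g: [(this is, 0), (a segment, 1) , (and another one, 1)
--     :return: boundaries of segmentation to use for pk method. For given example the function will return (4, 3)
--     """
--     curr_seg_length = 0
--     boundaries = []
--
--     classifications[-1] = 1
--
--     for i, classification in enumerate(classifications):
--         is_split_point = bool(classifications[i])
--         add_to_current_segment = 1 if sentences_length is None else sentences_length[i]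
--         curr_seg_length += add_to_current_segment
--         if (is_split_point):
--             boundaries.append(curr_seg_length)
--             curr_seg_length = 0
--
--     return boundaries
-- ===== SOURCE B (Python) =====
-- def get_seg_boundaries(classifications, sentences_length = None):
--     classifications[-1] = 1
--     splits = [i for i, c in enumerate(classifications) if c]
--     prevs = [-1] + splits[:-1]
--     if sentences_length is None:
--         return [i - p for p, i in zip(prevs, splits)]
--     return [sum(sentences_length[p + 1:i + 1]) for p, i in zip(prevs, splits)]
-- ===== Notes on version B (the rewrite author's own statement) =====
-- stated objective: alternative
-- what changed: Replaces the accumulate-and-reset scan with building the list of split indices once and emitting each boundary as a difference of consecutive split positions (or a range sum of sentence lengths) via zip comprehensions.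
-- outside the precondition, e.g. on get_seg_boundaries([1, 0, 1], [5, 2]): A raises IndexError, B returns [5, 2]
import Mathlib
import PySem

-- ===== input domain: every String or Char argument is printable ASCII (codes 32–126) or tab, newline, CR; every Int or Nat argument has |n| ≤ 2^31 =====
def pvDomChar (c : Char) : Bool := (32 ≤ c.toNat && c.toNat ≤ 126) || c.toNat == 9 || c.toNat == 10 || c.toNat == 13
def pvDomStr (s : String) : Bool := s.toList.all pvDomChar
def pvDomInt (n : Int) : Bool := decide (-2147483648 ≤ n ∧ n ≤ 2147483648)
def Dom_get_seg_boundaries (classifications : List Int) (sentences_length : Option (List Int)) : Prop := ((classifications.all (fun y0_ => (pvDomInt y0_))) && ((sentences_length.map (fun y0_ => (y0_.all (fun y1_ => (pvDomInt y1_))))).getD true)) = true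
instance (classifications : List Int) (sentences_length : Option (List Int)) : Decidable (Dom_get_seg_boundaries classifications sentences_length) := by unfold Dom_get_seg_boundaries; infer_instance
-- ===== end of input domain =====

-- B replaces A's accumulate-and-reset scan by building the split-index list once and emitting each
-- boundary from consecutive split positions (alternative decomposition, same cost). Both Pythons
-- mutate classifications[-1] = 1 in place; the equivalence proved is about the return value.

-- ===== PORT A =====
-- A-side helper: the named intermediate 'add_to_current_segment' (1, or sentences_length[i])
def pvAdd (sentences_length : Option (List Int)) (i : Int) : Int :=
  match sentences_length with
  | none => 1
  | some l => (PySem.List.pyGet? l i).getD 0   -- in range under Pre_, so getD 0 is never reached there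

-- A's loop body (st = (curr_seg_length, boundaries); ic = the enumerated (i, classification))
def pvStepA (sentences_length : Option (List Int)) (st : Int × List Int) (ic : Int × Int) : Int × List Int :=
  let is_split_point : Bool := ic.2 ≠ 0
  let add_to_current_segment : Int := pvAdd sentences_length ic.1
  let curr := st.1 + add_to_current_segment
  if is_split_point then (0, st.2 ++ [curr]) else (curr, st.2)

-- classifications[-1] = 1 on a nonempty list replaces the last element (empty list excluded by Pre_);
-- inside the loop, bool(classifications[i]) equals the enumerated element, the mutation being prior to the loop.
def get_seg_boundaries (classifications : List Int) (sentences_length : Option (List Int)) : List Int :=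
  let cls := classifications.dropLast ++ [1]
  ((PySem.List.enumerate cls).foldl (pvStepA sentences_length) (0, [])).2

-- ===== PORT B =====
def get_seg_boundaries_alt (classifications : List Int) (sentences_length : Option (List Int)) : List Int :=
  let cls := classifications.dropLast ++ [1]
  let splits : List Int := ((PySem.List.enumerate cls).filter (fun p => p.2 ≠ 0)).map (·.1)
  let prevs : List Int := -1 :: PySem.List.slice splits none (some (-1))
  match sentences_length with
  | none => (prevs.zip splits).map (fun pi => pi.2 - pi.1)
  | some l => (prevs.zip splits).map (fun pi => (PySem.List.slice l (some (pi.1 + 1)) (some (pi.2 + 1))).sum)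

-- ===== PRECONDITION & SPEC =====
-- Pre_ excludes exactly the inputs where A raises IndexError: the empty list (classifications[-1])
-- and a sentences_length shorter than classifications (sentences_length[i]).
def Pre_get_seg_boundaries (classifications : List Int) (sentences_length : Option (List Int)) : Prop :=
  classifications ≠ [] ∧ (∀ l, sentences_length = some l → classifications.length ≤ l.length)
instance (classifications : List Int) (sentences_length : Option (List Int)) : Decidable (Pre_get_seg_boundaries classifications sentences_length) := by unfold Pre_get_seg_boundaries; infer_instance

def pvWitness_get_seg_boundaries : List Int × Option (List Int) := ([1, 0, 0, 1, 0], some [3, 1, 2, 2, 4])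

def Spec_get_seg_boundaries (classifications : List Int) (sentences_length : Option (List Int)) (out : List Int) : Prop := out = get_seg_boundaries_alt classifications sentences_length
instance (classifications : List Int) (sentences_length : Option (List Int)) (out : List Int) : Decidable (Spec_get_seg_boundaries classifications sentences_length out) := by unfold Spec_get_seg_boundaries; infer_instance

-- ===== CLAIM (what is proved, stated in full; the proofs are below) =====
def Claim_equal_get_seg_boundaries : Prop := ∀ (classifications : List Int) (sentences_length : Option (List Int)), Dom_get_seg_boundaries classifications sentences_length → Pre_get_seg_boundaries classifications sentences_length → Spec_get_seg_boundaries classifications sentences_length (get_seg_boundaries classifications sentences_length)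

-- ===== LEMMAS AND PROOFS =====

-- A's loop, as a recursion on the enumerated pairs (curr is the running segment length)
def pvG (add : Int → Int) : List (Int × Int) → Int → List Int
  | [], _ => []
  | ic :: rest, curr =>
      if ic.2 ≠ 0 then (curr + add ic.1) :: pvG add rest 0 else pvG add rest (curr + add ic.1)

-- B's zip-comprehension, as a recursion on the split indices carrying the previous split
def pvZ (f : Int → Int → Int) : List Int → Int → List Int
  | [], _ => []
  | i :: rest, prev => f prev i :: pvZ f rest i

-- the boundary value B emits for the pair (prev, i)
def pvF (sl : Option (List Int)) : Int → Int → Int :=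
  match sl with
  | none => fun p i => i - p
  | some l => fun p i => (PySem.List.slice l (some (p + 1)) (some (i + 1))).sum

-- A's running segment length at position s when the last split was at prev
def pvInit (sl : Option (List Int)) (prev : Int) (s : Nat) : Int :=
  match sl with
  | none => (s : Int) - prev - 1
  | some l => (PySem.List.slice l (some (prev + 1)) (some (s : Int))).sum

lemma pvFoldA (sl : Option (List Int)) (pairs : List (Int × Int)) : ∀ (curr : Int) (acc : List Int),
    (pairs.foldl (pvStepA sl) (curr, acc)).2 = acc ++ pvG (pvAdd sl) pairs curr := by
  induction pairs with
  | nil => intro curr acc; simp [pvG]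
  | cons ic rest ih =>
    intro curr acc
    by_cases h : ic.2 = 0
    · have hs : pvStepA sl (curr, acc) ic = (curr + pvAdd sl ic.1, acc) := by
        simp [pvStepA, h]
      rw [List.foldl_cons, hs, ih]
      simp [pvG, h]
    · have hs : pvStepA sl (curr, acc) ic = (0, acc ++ [curr + pvAdd sl ic.1]) := by
        simp [pvStepA, h]
      rw [List.foldl_cons, hs, ih]
      simp [pvG, h]

lemma pvZip (f : Int → Int → Int) (splits : List Int) : ∀ (prev : Int),
    ((prev :: splits.dropLast).zip splits).map (fun pi => f pi.1 pi.2) = pvZ f splits prev := by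
  induction splits with
  | nil => intro prev; simp [pvZ]
  | cons i rest ih =>
    intro prev
    cases rest with
    | nil => simp [pvZ]
    | cons j t =>
      rw [List.dropLast_cons₂, List.zip_cons_cons, List.map_cons, ih i]
      rfl

lemma pvSliceSum (l : List Int) (a : Int) (s : Nat) (ha : 0 ≤ a) (has : a ≤ (s : Int)) :
    (PySem.List.slice l (some a) (some ((s : Int) + 1))).sum
      = (PySem.List.slice l (some a) (some (s : Int))).sum + (PySem.List.pyGet? l (s : Int)).getD 0 := by
  rw [PySem.List.slice_toNat l ha (by omega : (0:Int) ≤ (s : Int) + 1),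
      PySem.List.slice_toNat l ha (by omega : (0:Int) ≤ (s : Int))]
  have h1 : ((s : Int) + 1).toNat = s + 1 := by omega
  have h2 : ((s : Int)).toNat = s := by omega
  rw [h1, h2]
  have hm : s + 1 - a.toNat = (s - a.toNat) + 1 := by omega
  rw [hm, List.take_add_one, List.sum_append]
  congr 1
  rw [List.getElem?_drop]
  have h3 : a.toNat + (s - a.toNat) = s := by omega
  rw [h3, PySem.List.pyGet?_natCast]
  cases l[s]? <;> simp

lemma pvSliceEmpty (l : List Int) (a : Int) (ha : 0 ≤ a) :
    PySem.List.slice l (some a) (some a) = [] := by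
  rw [PySem.List.slice_toNat l ha ha]
  simp

lemma pvInitStep (sl : Option (List Int)) (prev : Int) (s : Nat)
    (h1 : -1 ≤ prev) (h2 : prev < (s : Int)) :
    pvInit sl prev s + pvAdd sl (s : Int) = pvInit sl prev (s + 1) := by
  cases sl with
  | none => simp only [pvInit, pvAdd]; push_cast; ring
  | some l =>
    simp only [pvInit, pvAdd]
    have h := pvSliceSum l (prev + 1) s (by omega) (by omega)
    push_cast
    omega

lemma pvInitF (sl : Option (List Int)) (prev : Int) (s : Nat) :
    pvInit sl prev (s + 1) = pvF sl prev (s : Int) := by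
  cases sl with
  | none => simp only [pvInit, pvF]; push_cast; ring
  | some l => simp only [pvInit, pvF]; push_cast; rfl

lemma pvInitZero (sl : Option (List Int)) (s : Nat) : pvInit sl (s : Int) (s + 1) = 0 := by
  cases sl with
  | none => simp only [pvInit]; push_cast; ring
  | some l =>
    simp only [pvInit]
    have hc : ((s + 1 : Nat) : Int) = (s : Int) + 1 := by push_cast; ring
    rw [hc, pvSliceEmpty l ((s : Int) + 1) (by omega)]
    rfl

lemma pvInitStart (sl : Option (List Int)) : pvInit sl (-1) 0 = 0 := by
  cases sl with
  | none => simp [pvInit]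
  | some l =>
    simp only [pvInit, Nat.cast_zero]
    rw [show (-1 : Int) + 1 = 0 by ring, pvSliceEmpty l 0 le_rfl]
    rfl

lemma pvCore (sl : Option (List Int)) (xs : List Int) : ∀ (s : Nat) (prev : Int),
    -1 ≤ prev → prev < (s : Int) →
    pvG (pvAdd sl) (PySem.List.enumerate xs (s : Int)) (pvInit sl prev s)
      = pvZ (pvF sl) (((PySem.List.enumerate xs (s : Int)).filter (fun p => p.2 ≠ 0)).map (·.1)) prev := by
  induction xs with
  | nil => intro s prev _ _; simp [PySem.List.enumerate, pvG, pvZ]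
  | cons x rest ih =>
    intro s prev h1 h2
    rw [PySem.List.enumerate_cons]
    have hc : (s : Int) + 1 = ((s + 1 : Nat) : Int) := by push_cast; ring
    by_cases hx : x = 0
    · have htail := ih (s + 1) prev h1 (by push_cast; omega)
      rw [show pvG (pvAdd sl) (((s : Int), x) :: PySem.List.enumerate rest ((s : Int) + 1)) (pvInit sl prev s)
            = pvG (pvAdd sl) (PySem.List.enumerate rest ((s : Int) + 1)) (pvInit sl prev s + pvAdd sl (s : Int))
          from by simp [pvG, hx]]
      rw [show List.filter (fun p => decide (p.2 ≠ 0)) (((s : Int), x) :: PySem.List.enumerate rest ((s : Int) + 1))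
            = List.filter (fun p => decide (p.2 ≠ 0)) (PySem.List.enumerate rest ((s : Int) + 1))
          from by simp [hx]]
      rw [pvInitStep sl prev s h1 h2, hc]
      exact htail
    · have htail := ih (s + 1) (s : Int) (by omega) (by push_cast; omega)
      rw [pvInitZero sl s] at htail
      rw [show pvG (pvAdd sl) (((s : Int), x) :: PySem.List.enumerate rest ((s : Int) + 1)) (pvInit sl prev s)
            = (pvInit sl prev s + pvAdd sl (s : Int)) :: pvG (pvAdd sl) (PySem.List.enumerate rest ((s : Int) + 1)) 0
          from by simp [pvG, hx]]
      rw [show List.filter (fun p => decide (p.2 ≠ 0)) (((s : Int), x) :: PySem.List.enumerate rest ((s : Int) + 1))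
            = ((s : Int), x) :: List.filter (fun p => decide (p.2 ≠ 0)) (PySem.List.enumerate rest ((s : Int) + 1))
          from by simp [hx]]
      rw [pvInitStep sl prev s h1 h2, pvInitF sl prev s, List.map_cons, hc, htail]
      rfl

lemma pvA_eq (cls : List Int) (sl : Option (List Int)) :
    get_seg_boundaries cls sl = pvG (pvAdd sl) (PySem.List.enumerate (cls.dropLast ++ [1]) 0) 0 := by
  simp only [get_seg_boundaries]
  simpa using pvFoldA sl (PySem.List.enumerate (cls.dropLast ++ [1]) 0) 0 []

lemma pvCore0 (sl : Option (List Int)) (xs : List Int) :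
    pvG (pvAdd sl) (PySem.List.enumerate xs 0) 0
      = pvZ (pvF sl) (((PySem.List.enumerate xs 0).filter (fun p => p.2 ≠ 0)).map (·.1)) (-1) := by
  have h := pvCore sl xs 0 (-1) (by omega) (by norm_num)
  rw [pvInitStart] at h
  simpa using h

-- ===== VERDICT (by name: the statement is the Claim_ definition above) =====
theorem get_seg_boundaries_spec : Claim_equal_get_seg_boundaries := by
  intro cls sl _ _
  unfold Spec_get_seg_boundaries
  simp only [get_seg_boundaries_alt, PySem.List.slice_to_neg_one]
  rw [pvA_eq, pvCore0]
  cases sl with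
  | none => exact (pvZip (fun p i => i - p) _ (-1)).symm
  | some l => exact (pvZip (fun p i => (PySem.List.slice l (some (p + 1)) (some (i + 1))).sum) _ (-1)).symm
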